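-- pv_equiv track=rewrite | github.com/mdemirhan/pylotus123 | lotus123/formula/functions/statistical.py | fn_permut
-- ===== SOURCE A (Python) =====
-- from typing import Any
--
-- def _to_number(value: Any) -> float | None:
--     """Convert value to number, returning None for non-numeric."""
--     if isinstance(value, (int, float)):
--         return float(value)
--     if isinstance(value, str):
--         try:
--             return float(value.replace(",", ""))
--         except ValueError:
--             return None
--     return None
--
-- def fn_permut(n: Any, k: Any) -> int:
--     """@PERMUT - Number of permutations.
--
--     Usage: @PERMUT(n, k)
--     Returns n! / (n-k)!
--     """
--     n_val = int(_to_number(n) if n is not None else 0)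
--     k_val = int(_to_number(k) if k is not None else 0)
--
--     if n_val < 0 or k_val < 0 or k_val > n_val:
--         return 0
--
--     result = 1
--     for i in range(n_val - k_val + 1, n_val + 1):
--         result *= i
--     return result
-- ===== SOURCE B (Python) =====
-- from typing import Any
--
-- def _to_number(value: Any) -> float | None:
--     """Convert value to number, returning None for non-numeric."""
--     if isinstance(value, (int, float)):
--         return float(value)
--     if isinstance(value, str):
--         try:
--             return float(value.replace(",", ""))
--         except ValueError:
--             return None
--     return None
--
-- def _prod_range(a: int, b: int) -> int:
--     """Product of the integers in [a, b), by balanced divide and conquer."""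
--     if b - a <= 0:
--         return 1
--     if b - a == 1:
--         return a
--     m = (a + b) // 2
--     return _prod_range(a, m) * _prod_range(m, b)
--
-- def fn_permut(n: Any, k: Any) -> int:
--     n_val = int(_to_number(n) if n is not None else 0)
--     k_val = int(_to_number(k) if k is not None else 0)
--     if n_val < 0 or k_val < 0 or k_val > n_val:
--         return 0
--     return _prod_range(n_val - k_val + 1, n_val + 1)
-- ===== Notes on version B (the rewrite author's own statement) =====
-- stated objective: alternative
-- what changed: Replaces A's linear accumulating for-loop over range(n-k+1, n+1) with a recursive balanced divide-and-conquer product of that range (a product tree that multiplies operands of similar size).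
import Mathlib
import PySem

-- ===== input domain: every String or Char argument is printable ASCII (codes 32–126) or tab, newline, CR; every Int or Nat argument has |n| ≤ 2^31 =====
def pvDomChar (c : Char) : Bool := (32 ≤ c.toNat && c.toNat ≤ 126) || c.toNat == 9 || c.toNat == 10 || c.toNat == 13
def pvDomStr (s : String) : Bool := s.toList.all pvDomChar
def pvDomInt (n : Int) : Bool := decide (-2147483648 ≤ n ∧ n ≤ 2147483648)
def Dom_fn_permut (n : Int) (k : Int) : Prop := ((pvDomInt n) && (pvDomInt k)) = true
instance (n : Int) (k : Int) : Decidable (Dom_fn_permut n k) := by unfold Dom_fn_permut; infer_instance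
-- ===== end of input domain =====

-- B replaces A's linear accumulating range-product loop with a recursive
-- balanced divide-and-conquer product of the same range (a product tree).


-- ===== PORT A =====
-- on Int inputs with |n| ≤ 2^31, int(_to_number(n)) = int(float(n)) = n (float is exact there),
-- so the coercion pipeline is the identity on Dom.
def fn_permut (n : Int) (k : Int) : Int :=
  if n < 0 ∨ k < 0 ∨ n < k then 0
  else (PySem.List.pyRange (n - k + 1) (n + 1) 1).foldl (· * ·) 1

-- ===== PORT B =====
-- midpoint bounds used by _prod_range's termination
theorem pv_mid_bounds (a b : Int) (h : 2 ≤ b - a) :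
    a < PySem.Int.floordiv (a + b) 2 ∧ PySem.Int.floordiv (a + b) 2 < b := by
  have h1 := PySem.Int.floordiv_mul_add_mod (a + b) 2
  have h2 := PySem.Int.mod_two_eq (a + b)
  omega

-- _prod_range(a, b): product of the integers in [a, b), balanced divide and conquer.
def prodRangeDC (a b : Int) : Int :=
  if b - a ≤ 0 then 1
  else if b - a = 1 then a
  else
    prodRangeDC a (PySem.Int.floordiv (a + b) 2) *
    prodRangeDC (PySem.Int.floordiv (a + b) 2) b
termination_by (b - a).toNat
decreasing_by
  · have := pv_mid_bounds a b (by omega); omega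
  · have := pv_mid_bounds a b (by omega); omega

def fn_permut_alt (n : Int) (k : Int) : Int :=
  if n < 0 ∨ k < 0 ∨ n < k then 0
  else prodRangeDC (n - k + 1) (n + 1)

-- ===== PRECONDITION & SPEC =====
def Spec_fn_permut (n : Int) (k : Int) (out : Int) : Prop := out = fn_permut_alt n k
instance (n : Int) (k : Int) (out : Int) : Decidable (Spec_fn_permut n k out) := by unfold Spec_fn_permut; infer_instance

-- ===== CLAIM (what is proved, stated in full; the proofs are below) =====
def Claim_equal_fn_permut : Prop := ∀ (n : Int) (k : Int), Dom_fn_permut n k → Spec_fn_permut n k (fn_permut n k)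

-- ===== LEMMAS AND PROOFS =====

theorem pv_foldl_mul_shift (l : List Int) (x : Int) :
    l.foldl (· * ·) x = x * l.foldl (· * ·) 1 := by
  have := List.foldl_assoc (op := (· * · : Int → Int → Int)) (l := l) (a₁ := x) (a₂ := 1)
  simpa using this

-- the divide-and-conquer product equals the left fold of the range
theorem pv_prodRangeDC_eq (t : Nat) : ∀ (a b : Int), (b - a).toNat ≤ t →
    prodRangeDC a b = (PySem.List.pyRange a b 1).foldl (· * ·) 1 := by
  induction t with
  | zero =>
      intro a b h
      have hba : b - a ≤ 0 := by omega
      rw [prodRangeDC, if_pos hba, PySem.List.pyRange_one_eq_nil (by omega)]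
      simp
  | succ t ih =>
      intro a b h
      rw [prodRangeDC]
      by_cases h0 : b - a ≤ 0
      · rw [if_pos h0, PySem.List.pyRange_one_eq_nil (by omega)]; simp
      · rw [if_neg h0]
        by_cases h1 : b - a = 1
        · rw [if_pos h1]
          have hb : b = a + 1 := by omega
          rw [hb, PySem.List.pyRange_one_singleton]
          simp
        · rw [if_neg h1]
          obtain ⟨hm1, hm2⟩ := pv_mid_bounds a b (by omega)
          rw [PySem.List.pyRange_one_append a (PySem.Int.floordiv (a + b) 2) b
                (le_of_lt hm1) (le_of_lt hm2),
              List.foldl_append,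
              pv_foldl_mul_shift (PySem.List.pyRange (PySem.Int.floordiv (a + b) 2) b 1),
              ih a (PySem.Int.floordiv (a + b) 2) (by omega),
              ih (PySem.Int.floordiv (a + b) 2) b (by omega)]

-- ===== VERDICT (by name: the statement is the Claim_ definition above) =====
theorem fn_permut_spec : Claim_equal_fn_permut := by
  intro n k _
  unfold Spec_fn_permut fn_permut fn_permut_alt
  by_cases hg : n < 0 ∨ k < 0 ∨ n < k
  · simp [hg]
  · simp only [hg, ite_false]
    exact (pv_prodRangeDC_eq ((n + 1) - (n - k + 1)).toNat (n - k + 1) (n + 1) le_rfl).symm
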